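-- pv_equiv track=rewrite | github.com/bipubipu/AdventOfCode | 2021/day10/day10-2.py | find_incomplete_line
-- ===== SOURCE A (Python) =====
-- chunk_pair = {'(': ')', '{': '}', '[': ']', '<': '>'}
--
-- chunk_open = ['(', '{', '[', '<']
--
-- chunk_close = [')', '}', ']', '>']
--
-- def find_incomplete_line(line):
--     line_copy = line
--     i = 0
--     while i < len(line_copy) - 1:
--         if line_copy[i] in chunk_open and line_copy[i + 1] in chunk_close:
--             if chunk_pair[line_copy[i]] == line_copy[i + 1]:
--                 line_copy = line_copy[:i] + line_copy[i + 2:]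
--                 # Reset the index, move it back to previous character
--                 i = i - 1 if i > 1 else 0
--                 continue
--             else:
--                 return None
--         i += 1
--     return line_copy
-- ===== SOURCE B (Python) =====
-- chunk_pair = {'(': ')', '{': '}', '[': ']', '<': '>'}
--
-- chunk_open = ['(', '{', '[', '<']
--
-- chunk_close = [')', '}', ']', '>']
--
-- def find_incomplete_line(line):
--     out = []
--     for c in line:
--         if out and out[-1] in chunk_open and c in chunk_close:
--             if chunk_pair[out[-1]] == c:
--                 out.pop()
--             else:
--                 return None
--         else:
--             out.append(c)
--     return ''.join(out)
-- ===== Notes on version B (the rewrite author's own statement) =====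
-- stated objective: faster
-- what changed: Replaced A's quadratic rescan loop (repeatedly rebuilding the string by slicing and stepping the index back after each matched-pair deletion) with a single left-to-right stack pass that pushes characters and pops on a matching adjacent open/close pair.
import Mathlib
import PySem

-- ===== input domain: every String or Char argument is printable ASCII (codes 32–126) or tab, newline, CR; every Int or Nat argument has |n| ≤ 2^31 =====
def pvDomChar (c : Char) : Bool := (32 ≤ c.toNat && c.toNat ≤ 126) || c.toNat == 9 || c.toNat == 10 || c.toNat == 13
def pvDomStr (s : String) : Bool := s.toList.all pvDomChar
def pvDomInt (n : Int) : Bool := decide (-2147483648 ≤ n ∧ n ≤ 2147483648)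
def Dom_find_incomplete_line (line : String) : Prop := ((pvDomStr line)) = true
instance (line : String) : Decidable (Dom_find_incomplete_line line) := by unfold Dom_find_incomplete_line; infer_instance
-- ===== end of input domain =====

-- B replaces A's quadratic rescan-after-slice loop by a single linear stack pass (objective: faster).

-- ===== PORT A =====
def chunkPair : PySem.Dict Char Char :=
  PySem.Dict.ofList [('(', ')'), ('{', '}'), ('[', ']'), ('<', '>')]

def chunkOpen : List Char := ['(', '{', '[', '<']

def chunkClose : List Char := [')', '}', ']', '>']

-- A's while loop over (line_copy, i); i is kept as a Nat (Python's i starts at 0 and never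
-- goes negative: it only does i += 1 and the reset `i - 1 if i > 1 else 0`).
-- `line_copy[:i] + line_copy[i+2:]` is `cs.take i ++ cs.drop (i+2)` (nonnegative slice bounds,
-- exact by PySem.List.slice_to / slice_from).
def aLoop (cs : List Char) (i : Nat) : Option (List Char) :=
  if h : i + 1 < cs.length then
    if cs[i] ∈ chunkOpen ∧ cs[i + 1] ∈ chunkClose then
      if chunkPair.get? cs[i] = some cs[i + 1] then
        aLoop (cs.take i ++ cs.drop (i + 2)) (if 1 < i then i - 1 else 0)
      else none
    else aLoop cs (i + 1)
  else some cs
termination_by 2 * cs.length - i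
decreasing_by
  · simp only [List.length_append, List.length_take, List.length_drop]
    split <;> omega
  · omega

def find_incomplete_line (line : String) : Option String :=
  (aLoop line.toList 0).map String.ofList

-- ===== PORT B =====
-- B's for-loop over the characters, with `out` as a stack (kept reversed: head = out[-1]).
def bLoop (out : List Char) (rest : List Char) : Option (List Char) :=
  match rest with
  | [] => some out.reverse
  | c :: rest' =>
    match out with
    | t :: out' =>
      if t ∈ chunkOpen ∧ c ∈ chunkClose then
        if chunkPair.get? t = some c then bLoop out' rest' else none
      else bLoop (c :: t :: out') rest'
    | [] => bLoop [c] rest'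

def find_incomplete_line_alt (line : String) : Option String :=
  (bLoop [] line.toList).map String.ofList

-- ===== PRECONDITION & SPEC =====
def Spec_find_incomplete_line (line : String) (out : Option String) : Prop := out = find_incomplete_line_alt line
instance (line : String) (out : Option String) : Decidable (Spec_find_incomplete_line line out) := by unfold Spec_find_incomplete_line; infer_instance

-- ===== CLAIM (what is proved, stated in full; the proofs are below) =====
def Claim_equal_find_incomplete_line : Prop := ∀ (line : String), Dom_find_incomplete_line line → Spec_find_incomplete_line line (find_incomplete_line line)

-- ===== LEMMAS AND PROOFS =====

-- "a is an open bracket and b a close bracket" (the adjacency A deletes or rejects).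
def Red (a b : Char) : Prop := a ∈ chunkOpen ∧ b ∈ chunkClose

-- A list with no reducible adjacency.
def Irr : List Char → Prop
  | a :: b :: t => ¬ Red a b ∧ Irr (b :: t)
  | _ => True

lemma open_not_close {a : Char} (h : a ∈ chunkOpen) : a ∉ chunkClose := by
  fin_cases h <;> decide

lemma irr_prefix : ∀ (xs ys : List Char), Irr (xs ++ ys) → Irr xs := by
  intro xs
  induction xs with
  | nil => intro _ _; trivial
  | cons a t ih =>
    intro ys h
    cases t with
    | nil => trivial
    | cons b t' =>
      exact ⟨h.1, ih ys h.2⟩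

lemma irr_take (xs : List Char) (n : Nat) (h : Irr xs) : Irr (xs.take n) := by
  apply irr_prefix _ (xs.drop n)
  rwa [List.take_append_drop]

lemma irr_short (xs : List Char) (h : xs.length ≤ 1) : Irr xs := by
  match xs, h with
  | [], _ => trivial
  | [_], _ => trivial

lemma irr_snoc : ∀ (xs : List Char) (a b : Char), Irr (xs ++ [a]) → ¬ Red a b →
    Irr ((xs ++ [a]) ++ [b]) := by
  intro xs
  induction xs with
  | nil => intro a b _ hab; exact ⟨hab, trivial⟩
  | cons c t ih =>
    intro a b h hab
    cases t with
    | nil => exact ⟨h.1, hab, trivial⟩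
    | cons d t' => exact ⟨h.1, ih a b h.2 hab⟩

-- Running B over an irreducible prefix just pushes it onto the stack.
lemma run_prefix : ∀ (p out rest : List Char), Irr p →
    (∀ t c, out.head? = some t → p.head? = some c → ¬ Red t c) →
    bLoop out (p ++ rest) = bLoop (p.reverse ++ out) rest := by
  intro p
  induction p with
  | nil => intro out rest _ _; simp
  | cons c p' ih =>
    intro out rest hirr hok
    have hnext : ∀ t d, (c :: out).head? = some t → p'.head? = some d → ¬ Red t d := by
      intro t d ht hd
      cases p' with
      | nil => simp at hd
      | cons d' t' =>
        simp at ht hd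
        subst ht; subst hd
        exact hirr.1
    have hirr' : Irr p' := by
      cases p' with
      | nil => trivial
      | cons d t' => exact hirr.2
    cases out with
    | nil =>
      show bLoop [c] (p' ++ rest) = _
      rw [ih [c] rest hirr' hnext]
      simp
    | cons t out' =>
      have hne : ¬ (t ∈ chunkOpen ∧ c ∈ chunkClose) := hok t c rfl rfl
      simp only [bLoop, List.cons_append, if_neg hne]
      rw [ih (c :: t :: out') rest hirr' hnext]
      simp

-- A matched adjacent pair is transparent to B, whatever the stack is.
lemma step_matched (a b : Char) (ha : a ∈ chunkOpen) (hb : b ∈ chunkClose)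
    (hp : chunkPair.get? a = some b) (out r : List Char) :
    bLoop out (a :: b :: r) = bLoop out r := by
  cases out with
  | nil =>
    simp only [bLoop, if_pos (And.intro ha hb), if_pos hp]
  | cons t out' =>
    have hne : ¬ (t ∈ chunkOpen ∧ a ∈ chunkClose) := fun h => open_not_close ha h.2
    simp only [bLoop, if_neg hne, if_pos (And.intro ha hb), if_pos hp]

-- A mismatched adjacent pair makes B return none, whatever the stack is.
lemma step_mismatched (a b : Char) (ha : a ∈ chunkOpen) (hb : b ∈ chunkClose)
    (hp : ¬ chunkPair.get? a = some b) (out r : List Char) :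
    bLoop out (a :: b :: r) = none := by
  cases out with
  | nil =>
    simp only [bLoop, if_pos (And.intro ha hb), if_neg hp]
  | cons t out' =>
    have hne : ¬ (t ∈ chunkOpen ∧ a ∈ chunkClose) := fun h => open_not_close ha h.2
    simp only [bLoop, if_neg hne, if_pos (And.intro ha hb), if_neg hp]

-- B of an irreducible list is the list itself.
lemma b_irr (xs : List Char) (h : Irr xs) : bLoop [] xs = some xs := by
  have h2 := run_prefix xs [] [] h (by intro t c ht _; simp at ht)
  simp only [List.append_nil, bLoop] at h2
  simpa using h2

-- Main invariant: while A is at (cs, i), the first i+1 characters are irreducible,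
-- and then A's loop and B's stack pass agree.
lemma main_lemma : ∀ (cs : List Char) (i : Nat), Irr (cs.take (i + 1)) →
    aLoop cs i = bLoop [] cs := by
  intro cs i
  induction cs, i using aLoop.induct with
  | case1 cs i h hred hpair ih =>
    -- matched adjacent pair at i: A deletes it and steps back
    intro hinv
    rw [aLoop]
    rw [dif_pos h, if_pos hred, if_pos hpair]
    set a := cs[i]
    set b := cs[i + 1]
    have hi : i < cs.length := by omega
    have hdec : cs = cs.take i ++ a :: b :: cs.drop (i + 2) := by
      conv_lhs => rw [← List.take_append_drop i cs]
      rw [List.drop_eq_getElem_cons hi, List.drop_eq_getElem_cons h]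
    have htk1 : cs.take (i + 1) = cs.take i ++ [a] := (List.take_concat_get' cs i hi).symm
    have hirr_p : Irr (cs.take i) := by
      have := irr_prefix (cs.take i) [a] (htk1 ▸ hinv)
      exact this
    -- new invariant for the recursive call
    have hinv' : Irr ((cs.take i ++ cs.drop (i + 2)).take ((if 1 < i then i - 1 else 0) + 1)) := by
      by_cases h1 : 1 ≤ i
      · have hle : (if 1 < i then i - 1 else 0) + 1 ≤ i := by split <;> omega
        rw [List.take_append_of_le_length (by simp; omega), List.take_take]
        have : min ((if 1 < i then i - 1 else 0) + 1) i = (if 1 < i then i - 1 else 0) + 1 := by omega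
        rw [this]
        have : cs.take ((if 1 < i then i - 1 else 0) + 1)
            = (cs.take (i + 1)).take ((if 1 < i then i - 1 else 0) + 1) := by
          rw [List.take_take]; congr 1; omega
        rw [this]
        exact irr_take _ _ hinv
      · have : i = 0 := by omega
        subst this
        simp only [if_neg (by omega : ¬ (1:Nat) < 0), Nat.zero_add]
        exact irr_short _ (by simp)
    simp only [dite_eq_ite] at ih
    -- B agrees across the deletion
    have e1 : bLoop [] (cs.take i ++ a :: b :: cs.drop (i + 2))
        = bLoop ((cs.take i).reverse ++ []) (a :: b :: cs.drop (i + 2)) :=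
      run_prefix _ _ _ hirr_p (by intro t c ht _; simp at ht)
    have e2 : bLoop [] (cs.take i ++ cs.drop (i + 2))
        = bLoop ((cs.take i).reverse ++ []) (cs.drop (i + 2)) :=
      run_prefix _ _ _ hirr_p (by intro t c ht _; simp at ht)
    rw [ih hinv', e2, ← step_matched a b hred.1 hred.2 hpair ((cs.take i).reverse ++ []) _,
      ← e1, ← hdec]
  | case2 cs i h hred hpair =>
    -- mismatched adjacent pair: both return none
    intro hinv
    rw [aLoop]
    rw [dif_pos h, if_pos hred, if_neg hpair]
    set a := cs[i]
    set b := cs[i + 1]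
    have hi : i < cs.length := by omega
    have hdec : cs = cs.take i ++ a :: b :: cs.drop (i + 2) := by
      conv_lhs => rw [← List.take_append_drop i cs]
      rw [List.drop_eq_getElem_cons hi, List.drop_eq_getElem_cons h]
    have htk1 : cs.take (i + 1) = cs.take i ++ [a] := (List.take_concat_get' cs i hi).symm
    have hirr_p : Irr (cs.take i) := irr_prefix (cs.take i) [a] (htk1 ▸ hinv)
    conv_rhs => rw [hdec]
    rw [run_prefix (cs.take i) [] _ hirr_p (by intro t c ht _; simp at ht)]
    rw [step_mismatched a b hred.1 hred.2 hpair]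
  | case3 cs i h hred ih =>
    -- no reducible adjacency at i: A advances, invariant extends
    intro hinv
    rw [aLoop]
    rw [dif_pos h, if_neg hred]
    apply ih
    have hi : i < cs.length := by omega
    have htk1 : cs.take (i + 1) = cs.take i ++ [cs[i]] := (List.take_concat_get' cs i hi).symm
    have htk2 : cs.take (i + 2) = cs.take (i + 1) ++ [cs[i + 1]] :=
      (List.take_concat_get' cs (i + 1) h).symm
    rw [htk2, htk1]
    exact irr_snoc (cs.take i) cs[i] cs[i + 1] (htk1 ▸ hinv) hred
  | case4 cs i h =>
    -- loop exhausted: the whole remaining string is irreducible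
    intro hinv
    rw [aLoop, dif_neg h]
    have : cs.take (i + 1) = cs := List.take_of_length_le (by omega)
    rw [this] at hinv
    exact (b_irr cs hinv).symm

-- ===== VERDICT (by name: the statement is the Claim_ definition above) =====
theorem find_incomplete_line_spec : Claim_equal_find_incomplete_line := by
  intro line _
  show find_incomplete_line line = find_incomplete_line_alt line
  unfold find_incomplete_line find_incomplete_line_alt
  rw [main_lemma line.toList 0 (irr_short _ (by simp))]
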